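-- pv_equiv track=rewrite | github.com/code-philia/CodeSearch | GraphCodeBERT/codesearch/auto_labelling/auto_labelling_format_unique_sample_teacher.py | add_unique_symbols
-- ===== SOURCE A (Python) =====
-- def add_unique_symbols(tokens, is_comment=True):
--     # Track token counts and processed tokens
--     token_counts = {}
--     processed_tokens = []
--
--     # First pass - count occurrences
--     for token in tokens:
--         if token in token_counts:
--             token_counts[token] += 1
--         else:
--             token_counts[token] = 1
--
--     # Second pass - add symbols to repeated tokens
--     token_seen = {}
--     for token in tokens:
--         if token_counts[token] > 1:
--             # Track occurrence number for this token
--             if token not in token_seen: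
--                 token_seen[token] = 1
--             else:
--                 token_seen[token] += 1
--
--             # Add triangle (▲) for comments, square (■) for code
--             symbol = "▲" if is_comment else "■"
--             processed_tokens.append(f"{token}{symbol}{token_seen[token]}")
--         else:
--             processed_tokens.append(token)
--
--     return processed_tokens
-- ===== SOURCE B (Python) =====
-- def add_unique_symbols(tokens, is_comment=True):
--     symbol = "\u25b2" if is_comment else "\u25a0"
--     # One pass: group the positions of each token.
--     positions = {}
--     for i, token in enumerate(tokens):
--         positions.setdefault(token, []).append(i)
--     # Overwrite only the repeated tokens, numbering occurrences in index order.
--     result = list(tokens)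
--     for token, idxs in positions.items():
--         if len(idxs) > 1:
--             for n, i in enumerate(idxs, 1):
--                 result[i] = f"{token}{symbol}{n}"
--     return result
-- ===== Notes on version B (the rewrite author's own statement) =====
-- stated objective: alternative
-- what changed: Instead of A's occurrence-count dict followed by a second pass that renumbers with a separate 'seen' dict, B builds one dict mapping each token to the list of its indices, copies the input, and overwrites only the repeated tokens in index order with their occurrence number.
import Mathlib
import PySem

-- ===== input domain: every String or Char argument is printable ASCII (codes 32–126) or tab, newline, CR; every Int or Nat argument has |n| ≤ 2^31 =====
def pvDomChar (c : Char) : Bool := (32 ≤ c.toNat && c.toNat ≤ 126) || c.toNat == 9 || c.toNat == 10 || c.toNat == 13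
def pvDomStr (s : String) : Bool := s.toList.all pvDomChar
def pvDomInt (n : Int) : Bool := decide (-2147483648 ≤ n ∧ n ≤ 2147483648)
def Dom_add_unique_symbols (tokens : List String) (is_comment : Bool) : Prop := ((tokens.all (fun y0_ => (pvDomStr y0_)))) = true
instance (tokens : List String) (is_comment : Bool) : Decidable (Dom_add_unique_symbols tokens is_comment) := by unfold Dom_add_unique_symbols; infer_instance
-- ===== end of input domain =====

-- B replaces A's count-then-renumber pair of dict passes by one positions dict (token → its index
-- list) and in-place overwriting of only the repeated tokens; objective: alternative (same O(n) cost).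

-- ===== PORT A =====
def add_unique_symbols (tokens : List String) (is_comment : Bool) : List String :=
  -- first pass: count occurrences
  let token_counts : PySem.Dict String Int := tokens.foldl (fun d token =>
      if d.contains token then d.insert token (d.getD token 0 + 1)
      else d.insert token 1) PySem.Dict.empty
  -- second pass: add symbols to repeated tokens (state = (token_seen, processed_tokens))
  (tokens.foldl (fun (st : PySem.Dict String Int × List String) token =>
      if token_counts.getD token 0 > 1 then
        let token_seen := if st.1.contains token = false then st.1.insert token 1
                          else st.1.insert token (st.1.getD token 0 + 1)
        let symbol := if is_comment then "▲" else "■"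
        (token_seen, st.2 ++ [token ++ symbol ++ PySem.Int.toStr (token_seen.getD token 0)])
      else (st.1, st.2 ++ [token])) ((PySem.Dict.empty : PySem.Dict String Int), [])).2

-- ===== PORT B =====
def add_unique_symbols_alt (tokens : List String) (is_comment : Bool) : List String :=
  let symbol := if is_comment then "▲" else "■"
  -- one pass: positions.setdefault(token, []).append(i)  ≡  positions[token] = positions.get(token, []) + [i]
  let positions : PySem.Dict String (List Int) := (PySem.List.enumerate tokens).foldl
      (fun d p => d.modify p.2 ([] : List Int) (· ++ [p.1])) PySem.Dict.empty
  let result := tokens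
  -- overwrite repeated tokens; result[i] = … : every index i comes from enumerate(tokens),
  -- so 0 ≤ i < len(result) and List.set i.toNat is exactly Python's list item assignment here
  positions.items.foldl (fun res kv =>
      if 1 < kv.2.length then
        (PySem.List.enumerate kv.2 1).foldl
          (fun r q => r.set q.2.toNat (kv.1 ++ symbol ++ PySem.Int.toStr q.1)) res
      else res) result

-- ===== PRECONDITION & SPEC =====
def Spec_add_unique_symbols (tokens : List String) (is_comment : Bool) (out : List String) : Prop := out = add_unique_symbols_alt tokens is_comment
instance (tokens : List String) (is_comment : Bool) (out : List String) : Decidable (Spec_add_unique_symbols tokens is_comment out) := by unfold Spec_add_unique_symbols; infer_instance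

-- ===== CLAIM (what is proved, stated in full; the proofs are below) =====
def Claim_equal_add_unique_symbols : Prop := ∀ (tokens : List String) (is_comment : Bool), Dom_add_unique_symbols tokens is_comment → Spec_add_unique_symbols tokens is_comment (add_unique_symbols tokens is_comment)

-- ===== LEMMAS AND PROOFS =====

-- the common pointwise description of the output: its token at position j
def pvOut (sym : String) (tokens : List String) (j : Nat) : String :=
  let t := tokens.getD j ""
  if 1 < tokens.count t then t ++ sym ++ PySem.Int.toStr (((tokens.take (j+1)).count t : Int)) else t

-- the indices (counted from start s) at which token t occurs
def pvIdx (s : Int) (tokens : List String) (t : String) : List Int :=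
  ((PySem.List.enumerate tokens s).filter (fun p => p.2 == t)).map (·.1)

theorem pvIdx_cons (s : Int) (x : String) (xs : List String) (t : String) :
    pvIdx s (x :: xs) t = (if x = t then [s] else []) ++ pvIdx (s+1) xs t := by
  simp only [pvIdx, PySem.List.enumerate_cons, List.filter_cons]
  by_cases h : x = t <;> simp [h]

theorem pvIdx_mem (s : Int) (tokens : List String) (t : String) (i : Int) :
    i ∈ pvIdx s tokens t ↔ ∃ (k : Nat) (h : k < tokens.length), i = s + k ∧ tokens[k] = t := by
  simp only [pvIdx, List.mem_map, List.mem_filter, PySem.List.mem_enumerate_iff]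
  constructor
  · rintro ⟨p, ⟨⟨k, hk, rfl⟩, hpt⟩, rfl⟩
    exact ⟨k, hk, rfl, by simpa using hpt⟩
  · rintro ⟨k, hk, rfl, ht⟩
    exact ⟨(s + k, tokens[k]), ⟨⟨k, hk, rfl⟩, by simpa using ht⟩, rfl⟩

theorem pvIdx_length (s : Int) (tokens : List String) (t : String) :
    (pvIdx s tokens t).length = tokens.count t := by
  induction tokens generalizing s with
  | nil => simp [pvIdx, PySem.List.enumerate_nil]
  | cons x xs ih =>
    rw [pvIdx_cons]
    by_cases h : x = t <;> simp [h, ih]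

theorem pvIdx_pairwise (s : Int) (tokens : List String) (t : String) :
    (pvIdx s tokens t).Pairwise (· < ·) := by
  apply List.pairwise_map.2
  exact (PySem.List.pairwise_lt_enumerate tokens s).filter _

theorem pvIdx_countP_zero (s : Int) (tokens : List String) (t : String) :
    (pvIdx s tokens t).countP (fun i => decide (i < s)) = 0 := by
  apply List.countP_eq_zero.2
  intro i hi
  obtain ⟨k, hk, rfl, _⟩ := (pvIdx_mem s tokens t i).1 hi
  simp

theorem pvIdx_countP (s : Int) (tokens : List String) (t : String) (j : Nat) :
    (pvIdx s tokens t).countP (fun i => decide (i < s + (j : Int))) = (tokens.take j).count t := by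
  induction tokens generalizing s j with
  | nil => simp [pvIdx, PySem.List.enumerate_nil]
  | cons x xs ih =>
    cases j with
    | zero => simpa using pvIdx_countP_zero s (x :: xs) t
    | succ m =>
      rw [pvIdx_cons, List.countP_append]
      have hc : (fun i => decide (i < s + ((m+1 : Nat) : Int))) = (fun i => decide (i < (s+1) + (m : Int))) := by
        funext i; simp; constructor <;> intro <;> push_cast at * <;> omega
      rw [hc, ih (s+1) m]
      have hx : ((if x = t then [s] else []) : List Int).countP (fun i => decide (i < (s+1) + (m : Int))) = if x = t then 1 else 0 := by
        by_cases h : x = t <;> simp [h] <;> omega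
      rw [hx]
      simp [List.count_cons]
      by_cases h : x = t <;> simp [h]
      omega

theorem count_take_succ (tokens : List String) (j : Nat) (h : j < tokens.length) (t : String) :
    (tokens.take (j+1)).count t = (tokens.take j).count t + (if tokens[j] = t then 1 else 0) := by
  rw [List.take_add_one, List.getElem?_eq_getElem h, List.count_append]
  by_cases ht : tokens[j] = t <;> simp [ht]

-- ===== A-side =====
theorem countsA (tokens : List String) (t : String) :
    (tokens.foldl (fun d token =>
      if d.contains token then d.insert token (d.getD token 0 + 1)
      else d.insert token 1) PySem.Dict.empty).getD t 0 = (tokens.count t : Int) := by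
  have hstep : (fun (d : PySem.Dict String Int) token =>
      if d.contains token then d.insert token (d.getD token 0 + 1)
      else d.insert token 1) = fun d token => d.insert token (d.getD token 0 + 1) := by
    funext d x
    by_cases h : d.contains x
    · simp [h]
    · rw [if_neg (by simp [h]), PySem.Dict.getD_of_not_contains _ _ (by simpa using h)]
      norm_num
  rw [hstep, PySem.Dict.getD_foldl_insert_add_one, PySem.Dict.getD_empty]
  norm_num

-- A's second loop described left to right, carrying the processed prefix
def pvSpec (sym : String) (full : List String) (pref : List String) : List String → List String
  | [] => []
  | t :: rest =>
      (if 1 < full.count t then t ++ sym ++ PySem.Int.toStr ((pref.count t : Int) + 1) else t)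
        :: pvSpec sym full (pref ++ [t]) rest

theorem pvSpec_length (sym : String) (full pref rest : List String) :
    (pvSpec sym full pref rest).length = rest.length := by
  induction rest generalizing pref with
  | nil => rfl
  | cons t r ih => simp [pvSpec, ih]

theorem pvSpec_getElem (sym : String) (full pref rest : List String) (j : Nat)
    (h : j < rest.length) :
    (pvSpec sym full pref rest)[j]'(by rw [pvSpec_length]; exact h)
      = (if 1 < full.count rest[j] then
          rest[j] ++ sym ++ PySem.Int.toStr (((pref ++ rest.take (j+1)).count rest[j] : Int))
        else rest[j]) := by
  induction rest generalizing pref j with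
  | nil => simp at h
  | cons t r ih =>
    cases j with
    | zero =>
      by_cases hc : 1 < full.count t
      · simp [pvSpec, hc, List.count_append]
      · simp [pvSpec, hc]
    | succ m =>
      have hm : m < r.length := by simpa using h
      simp only [pvSpec, List.getElem_cons_succ]
      rw [ih (pref ++ [t]) m hm]
      have : pref ++ (t :: r).take (m+1+1) = (pref ++ [t]) ++ r.take (m+1) := by
        simp
      rw [this]

theorem loopA (tokens : List String) (is_comment : Bool) (rest : List String)
    (seen : PySem.Dict String Int) (acc : List String) (pref : List String)
    (hinv : ∀ t, 1 < tokens.count t → seen.getD t 0 = ((pref.count t : Int))) :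
    (rest.foldl (fun (st : PySem.Dict String Int × List String) token =>
      if ((tokens.foldl (fun d token =>
        if d.contains token then d.insert token (d.getD token 0 + 1)
        else d.insert token 1) (PySem.Dict.empty : PySem.Dict String Int)).getD token 0) > (1:Int) then
        let token_seen := if st.1.contains token = false then st.1.insert token 1
                          else st.1.insert token (st.1.getD token 0 + 1)
        let symbol := if is_comment then "▲" else "■"
        (token_seen, st.2 ++ [token ++ symbol ++ PySem.Int.toStr (token_seen.getD token 0)])
      else (st.1, st.2 ++ [token])) (seen, acc)).2
    = acc ++ pvSpec (if is_comment then "▲" else "■") tokens pref rest := by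
  induction rest generalizing seen acc pref with
  | nil => simp [pvSpec]
  | cons t r ih =>
    rw [List.foldl_cons]
    have hcnt : ((tokens.foldl (fun d token =>
        if d.contains token then d.insert token (d.getD token 0 + 1)
        else d.insert token 1) PySem.Dict.empty).getD t 0) = (tokens.count t : Int) := countsA tokens t
    by_cases hc : 1 < tokens.count t
    · have hgt : ((tokens.foldl (fun d token =>
          if d.contains token then d.insert token (d.getD token 0 + 1)
          else d.insert token 1) (PySem.Dict.empty : PySem.Dict String Int)).getD t 0) > (1:Int) := by
        rw [hcnt]; exact_mod_cast hc
      rw [if_pos hgt]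
      have hseen : (if seen.contains t = false then seen.insert t 1
            else seen.insert t (seen.getD t 0 + 1)) = seen.insert t ((pref.count t : Int) + 1) := by
        by_cases hct : seen.contains t
        · simp [hct, hinv t hc]
        · rw [if_pos (by simpa using hct)]
          have h0 : seen.getD t 0 = 0 := PySem.Dict.getD_of_not_contains _ _ (by simpa using hct)
          have : (pref.count t : Int) = 0 := by rw [← hinv t hc, h0]
          rw [this]; norm_num
      simp only [hseen]
      rw [ih _ _ (pref ++ [t])]
      · simp only [PySem.Dict.getD_insert_self, pvSpec, if_pos hc]
        simp
      · intro u hu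
        by_cases hut : u = t
        · subst hut
          rw [PySem.Dict.getD_insert_self]
          simp [List.count_append]
        · rw [PySem.Dict.getD_insert_of_ne _ _ _ hut, hinv u hu]
          simp [List.count_append, Ne.symm hut]
    · have hle : ¬ ((tokens.foldl (fun d token =>
          if d.contains token then d.insert token (d.getD token 0 + 1)
          else d.insert token 1) (PySem.Dict.empty : PySem.Dict String Int)).getD t 0) > (1:Int) := by
        rw [hcnt]; exact_mod_cast hc
      rw [if_neg hle]
      rw [ih _ _ (pref ++ [t])]
      · simp only [pvSpec, if_neg hc]
        simp
      · intro u hu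
        have hut : u ≠ t := by rintro rfl; omega
        rw [hinv u hu]
        simp [List.count_append, Ne.symm hut]

theorem aEq (tokens : List String) (is_comment : Bool) :
    add_unique_symbols tokens is_comment
      = (List.range tokens.length).map (pvOut (if is_comment then "▲" else "■") tokens) := by
  simp only [add_unique_symbols]
  rw [loopA tokens is_comment tokens PySem.Dict.empty [] []
    (by intro t _; simp [PySem.Dict.getD_empty])]
  simp only [List.nil_append]
  apply List.ext_getElem (by simp [pvSpec_length])
  intro j h1 h2
  have hj : j < tokens.length := by simpa [pvSpec_length] using h1
  rw [pvSpec_getElem _ tokens [] tokens j hj]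
  simp only [List.getElem_map, List.getElem_range, List.nil_append]
  unfold pvOut
  simp only [List.getD_eq_getElem tokens "" hj]

-- ===== B-side =====
theorem setFold_len (g : Int → String) (L : List Int) (s : Int) (res : List String) :
    ((PySem.List.enumerate L s).foldl (fun r q => r.set q.2.toNat (g q.1)) res).length = res.length := by
  induction L generalizing s res with
  | nil => simp [PySem.List.enumerate_nil]
  | cons i L ih => simp [PySem.List.enumerate_cons, ih]

theorem setFold_get (g : Int → String) (L : List Int) (s : Int) (res : List String)
    (hp : L.Pairwise (· < ·)) (hb : ∀ i ∈ L, 0 ≤ i ∧ i.toNat < res.length)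
    (j : Nat) (h : j < res.length) :
    ((PySem.List.enumerate L s).foldl (fun r q => r.set q.2.toNat (g q.1)) res).getD j ""
      = if ((j : Int)) ∈ L then g (s + (L.countP (fun i => decide (i < (j : Int))) : Int))
        else res.getD j "" := by
  induction L generalizing s res with
  | nil => simp [PySem.List.enumerate_nil]
  | cons i L ih =>
    rw [PySem.List.enumerate_cons, List.foldl_cons]
    obtain ⟨hi0, hilen⟩ := hb i (by simp)
    have hgt : ∀ x ∈ L, i < x := by
      intro x hx; exact (List.pairwise_cons.1 hp).1 x hx
    have hlen' : (res.set i.toNat (g s)).length = res.length := by simp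
    rw [ih (s+1) _ (List.pairwise_cons.1 hp).2
      (by intro x hx; obtain ⟨a, b⟩ := hb x (by simp [hx]); exact ⟨a, by simpa [hlen'] using b⟩)
      (by simpa using h)]
    by_cases hjL : ((j : Int)) ∈ L
    · rw [if_pos hjL, if_pos (by simp [hjL])]
      have hij : i < (j : Int) := hgt _ hjL
      have : (i :: L).countP (fun x => decide (x < (j : Int))) = L.countP (fun x => decide (x < (j : Int))) + 1 := by
        rw [List.countP_cons]; simp [hij]
      rw [this]
      congr 1
      push_cast
      ring
    · rw [if_neg hjL]
      by_cases hji : (j : Int) = i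
      · rw [if_pos (by simp [hji])]
        have hjt : j = i.toNat := by omega
        have hcnt : (i :: L).countP (fun x => decide (x < (j : Int))) = 0 := by
          apply List.countP_eq_zero.2
          intro x hx
          simp only [List.mem_cons] at hx
          rcases hx with rfl | hx
          · simp; omega
          · have := hgt x hx; simp; omega
        rw [hcnt, List.getD_eq_getElem _ _ (by simpa using h)]
        subst hjt
        simp
      · rw [if_neg (by simp [hjL, hji])]
        have : (res.set i.toNat (g s)).getD j "" = res.getD j "" := by
          rw [List.getD_eq_getElem _ _ (by simpa using h), List.getD_eq_getElem _ _ h]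
          rw [List.getElem_set_ne (by omega)]
        rw [this]

theorem outerFold_len (sym : String) (tokens : List String) (ks : List String) (res : List String) :
    ((ks.map (fun t => (t, pvIdx 0 tokens t))).foldl (fun res kv =>
      if 1 < kv.2.length then
        (PySem.List.enumerate kv.2 1).foldl
          (fun r q => r.set q.2.toNat (kv.1 ++ sym ++ PySem.Int.toStr q.1)) res
      else res) res).length = res.length := by
  induction ks generalizing res with
  | nil => simp
  | cons t ks ih =>
    simp only [List.map_cons, List.foldl_cons]
    by_cases hc : 1 < (pvIdx 0 tokens t).length
    · rw [if_pos hc, ih, setFold_len (g := fun n => t ++ sym ++ PySem.Int.toStr n)]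
    · rw [if_neg hc, ih]

theorem outerFold_get (sym : String) (tokens : List String) (ks : List String) (res : List String)
    (hlen : res.length = tokens.length) (j : Nat) (h : j < tokens.length) :
    ((ks.map (fun t => (t, pvIdx 0 tokens t))).foldl (fun res kv =>
      if 1 < kv.2.length then
        (PySem.List.enumerate kv.2 1).foldl
          (fun r q => r.set q.2.toNat (kv.1 ++ sym ++ PySem.Int.toStr q.1)) res
      else res) res).getD j ""
    = if tokens[j] ∈ ks ∧ 1 < tokens.count tokens[j] then pvOut sym tokens j
      else res.getD j ""    := by
  induction ks generalizing res with
  | nil => simp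
  | cons t ks ih =>
    simp only [List.map_cons, List.foldl_cons]
    have hGlen : (pvIdx 0 tokens t).length = tokens.count t := pvIdx_length 0 tokens t
    by_cases hc : 1 < (pvIdx 0 tokens t).length
    · rw [if_pos hc]
      have hb : ∀ i ∈ pvIdx 0 tokens t, 0 ≤ i ∧ i.toNat < res.length := by
        intro i hi
        obtain ⟨k, hk, rfl, _⟩ := (pvIdx_mem 0 tokens t i).1 hi
        constructor
        · positivity
        · simpa [hlen] using hk
      have hres1len : ((PySem.List.enumerate (pvIdx 0 tokens t) 1).foldl
          (fun r q => r.set q.2.toNat (t ++ sym ++ PySem.Int.toStr q.1)) res).length = tokens.length := by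
        rw [setFold_len (g := fun n => t ++ sym ++ PySem.Int.toStr n), hlen]
      rw [ih _ hres1len]
      have hres1 : ((PySem.List.enumerate (pvIdx 0 tokens t) 1).foldl
          (fun r q => r.set q.2.toNat (t ++ sym ++ PySem.Int.toStr q.1)) res).getD j ""
          = if ((j : Int)) ∈ pvIdx 0 tokens t
            then t ++ sym ++ PySem.Int.toStr (1 + ((pvIdx 0 tokens t).countP (fun i => decide (i < (j : Int))) : Int))
            else res.getD j "" :=
        setFold_get (fun n => t ++ sym ++ PySem.Int.toStr n) (pvIdx 0 tokens t) 1 res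
          (pvIdx_pairwise 0 tokens t) hb j (by omega)
      have hmemG : ((j : Int)) ∈ pvIdx 0 tokens t ↔ tokens[j] = t := by
        rw [pvIdx_mem]
        constructor
        · rintro ⟨k, hk, hkj, hkt⟩
          have : k = j := by omega
          subst this; exact hkt
        · intro ht; exact ⟨j, h, by omega, ht⟩
      by_cases hks : tokens[j] ∈ ks ∧ 1 < tokens.count tokens[j]
      · rw [if_pos hks, if_pos ⟨by simp [hks.1], hks.2⟩]
      · rw [if_neg hks, hres1]
        by_cases hjt : tokens[j] = t
        · rw [if_pos (hmemG.2 hjt)]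
          have hcj : 1 < tokens.count tokens[j] := by rw [hjt, ← hGlen]; exact hc
          rw [if_pos ⟨by simp [hjt], hcj⟩]
          have hcp : (pvIdx 0 tokens t).countP (fun i => decide (i < (j : Int))) = (tokens.take j).count t := by
            simpa using pvIdx_countP 0 tokens t j
          rw [hcp]
          unfold pvOut
          simp only [List.getD_eq_getElem tokens "" h]
          rw [if_pos hcj, count_take_succ tokens j h, hjt, if_pos rfl]
          congr 1
          push_cast
          ring
        · rw [if_neg (fun hm => hjt (hmemG.1 hm))]
          rw [if_neg (by rintro ⟨hm, hcnt⟩; rcases List.mem_cons.1 hm with h2 | h2; exact hjt h2; exact hks ⟨h2, hcnt⟩)]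
    · rw [if_neg hc, ih _ hlen]
      by_cases hjt : tokens[j] = t
      · have hnc : ¬ 1 < tokens.count tokens[j] := by rw [hjt, ← hGlen]; exact hc
        rw [if_neg (by rintro ⟨_, hcnt⟩; exact hnc hcnt), if_neg (by rintro ⟨_, hcnt⟩; exact hnc hcnt)]
      · have : (tokens[j] ∈ t :: ks ∧ 1 < tokens.count tokens[j]) ↔ (tokens[j] ∈ ks ∧ 1 < tokens.count tokens[j]) := by
          simp [List.mem_cons, hjt]
        rw [if_congr this rfl rfl]

theorem altEq (tokens : List String) (is_comment : Bool) :
    add_unique_symbols_alt tokens is_comment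
      = (List.range tokens.length).map (pvOut (if is_comment then "▲" else "■") tokens) := by
  simp only [add_unique_symbols_alt]
  have hfold : (PySem.List.enumerate tokens).foldl
        (fun d p => d.modify p.2 ([] : List Int) (· ++ [p.1])) PySem.Dict.empty
      = ((PySem.List.enumerate tokens).map Prod.swap).foldl
        (fun d p => d.modify p.1 ([] : List Int) (· ++ [p.2])) PySem.Dict.empty := by
    rw [List.foldl_map]
    simp
  have hnodup : ((PySem.List.enumerate tokens).foldl
      (fun d p => d.modify p.2 ([] : List Int) (· ++ [p.1])) PySem.Dict.empty).keys.Nodup := by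
    exact PySem.Dict.nodup_keys_foldl_modify_key _ _ _ _ _ PySem.Dict.nodup_keys_empty
  have hgetD : ∀ c, ((PySem.List.enumerate tokens).foldl
      (fun d p => d.modify p.2 ([] : List Int) (· ++ [p.1])) PySem.Dict.empty).getD c []
      = pvIdx 0 tokens c := by
    intro c
    rw [hfold, PySem.Dict.getD_foldl_modify_append, PySem.Dict.getD_empty]
    simp [pvIdx, List.filter_map, List.map_map, Function.comp_def]
  have hkeys : ((PySem.List.enumerate tokens).foldl
      (fun d p => d.modify p.2 ([] : List Int) (· ++ [p.1])) PySem.Dict.empty).keys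
      = PySem.Set.ofList tokens := by
    rw [PySem.Dict.keys_foldl_modify_key]
    simp [PySem.Dict.keys_empty, PySem.List.map_snd_enumerate, PySem.Set.update_nil_left]
  have hitems : ((PySem.List.enumerate tokens).foldl
      (fun d p => d.modify p.2 ([] : List Int) (· ++ [p.1])) PySem.Dict.empty).items
      = (PySem.Set.ofList tokens).map (fun k => (k, pvIdx 0 tokens k)) := by
    rw [PySem.Dict.items_eq_map_keys _ hnodup ([] : List Int), hkeys]
    exact List.map_congr_left (fun k _ => by rw [hgetD k])
  rw [hitems]
  apply List.ext_getElem (by rw [outerFold_len]; simp)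
  intro j h1 h2
  have hj : j < tokens.length := by
    have := outerFold_len (if is_comment then "▲" else "■") tokens (PySem.Set.ofList tokens) tokens
    omega
  rw [← List.getD_eq_getElem _ "" h1]
  rw [outerFold_get _ tokens _ tokens rfl j hj]
  simp only [List.getElem_map, List.getElem_range]
  by_cases hc : 1 < tokens.count tokens[j]
  · rw [if_pos ⟨(PySem.Set.mem_ofList _ _).2 (List.getElem_mem hj), hc⟩]
  · rw [if_neg (by rintro ⟨_, hcc⟩; exact hc hcc)]
    unfold pvOut
    rw [List.getD_eq_getElem tokens "" hj]
    simp [hc]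

-- ===== VERDICT (by name: the statement is the Claim_ definition above) =====
theorem add_unique_symbols_spec : Claim_equal_add_unique_symbols := by
  intro tokens is_comment _
  unfold Spec_add_unique_symbols
  rw [aEq, altEq]
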